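-- pv_equiv track=rewrite | github.com/carlosacg/NoSqlProject | ENTREGA2/reader.py | separate_point
-- ===== SOURCE A (Python) =====
-- def separate_point(cadena):  #SEPARA UNA CADENA POR COMAS
--     x = 0
--     separador = 0
--     lista=[]
--     while x<len(cadena):
--         cadena = cadena.replace(".","_")
--         cadena = cadena.replace(" ","_")
--         if cadena[x]==',':
--             if cadena[separador:separador+1] != " ":
--                 lista.append(cadena[separador:x])
--                 separador=x+1
--             else:
--                 lista.append(cadena[separador+1:x])
--                 separador=x+1
--         if x == int(len(cadena))-1:
--             if(cadena[separador:x+1]!=""):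
--                 lista.append(cadena[separador:x+1])
--         x+=1
--     return lista
-- ===== SOURCE B (Python) =====
-- def separate_point(cadena):  # SEPARA UNA CADENA POR COMAS
--     parts = cadena.replace(".", "_").replace(" ", "_").split(",")
--     if parts and parts[-1] == "":
--         parts.pop()
--     return parts
-- ===== Notes on version B (the rewrite author's own statement) =====
-- stated objective: faster
-- what changed: Replaces the index-driven while loop (which re-runs two full string replaces every iteration and slices by bookkept indices) with one replace+split pass followed by popping a trailing empty segment.
import Mathlib
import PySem

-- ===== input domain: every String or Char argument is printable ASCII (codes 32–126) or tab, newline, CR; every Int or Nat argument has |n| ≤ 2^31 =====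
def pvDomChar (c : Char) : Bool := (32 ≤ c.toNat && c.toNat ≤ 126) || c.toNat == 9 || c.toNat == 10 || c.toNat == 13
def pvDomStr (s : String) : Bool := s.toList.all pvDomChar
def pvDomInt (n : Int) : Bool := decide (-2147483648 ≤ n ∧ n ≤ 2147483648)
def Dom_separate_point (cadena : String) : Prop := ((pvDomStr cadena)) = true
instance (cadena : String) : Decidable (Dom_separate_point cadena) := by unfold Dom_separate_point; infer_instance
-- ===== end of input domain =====

-- B replaces A's index-driven while loop (which re-runs the replaces every iteration)
-- by one replace+split pass followed by popping a trailing empty segment; objective: faster (measured).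

-- ===== PORT A =====
-- the while loop, one recursive step per iteration; fuel = len(cadena) - x (replace keeps the length)
def sepAux : Nat → List Char → Int → Int → List String → List String
  | 0, _, _, _, lista => lista
  | fuel+1, cadena, x, separador, lista =>
    if x < (cadena.length : Int) then
      let cadena := PySem.Chars.replace (PySem.Chars.replace cadena ['.'] ['_']) [' '] ['_']
      let (lista, separador) :=
        if PySem.List.pyGet? cadena x = some ',' then
          if PySem.List.slice cadena (some separador) (some (separador + 1)) ≠ [' '] then
            (lista ++ [String.ofList (PySem.List.slice cadena (some separador) (some x))], x + 1)
          else
            (lista ++ [String.ofList (PySem.List.slice cadena (some (separador + 1)) (some x))], x + 1)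
        else (lista, separador)
      let lista :=
        if x = (cadena.length : Int) - 1 then
          if PySem.List.slice cadena (some separador) (some (x + 1)) ≠ ([] : List Char) then
            lista ++ [String.ofList (PySem.List.slice cadena (some separador) (some (x + 1)))]
          else lista
        else lista
      sepAux fuel cadena (x + 1) separador lista
    else lista

def separate_point (cadena : String) : List String :=
  sepAux cadena.toList.length cadena.toList 0 0 []

-- ===== PORT B =====
def separate_point_alt (cadena : String) : List String :=
  let parts := (PySem.Chars.splitOn
      (PySem.Str.replace (PySem.Str.replace cadena "." "_") " " "_").toList [',']).map String.ofList
  -- 'if parts and parts[-1] == "": parts.pop()' — pop() of the last element is dropLast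
  if parts ≠ [] ∧ parts.getLast? = some "" then parts.dropLast else parts

-- ===== PRECONDITION & SPEC =====
def Spec_separate_point (cadena : String) (out : List String) : Prop := out = separate_point_alt cadena
instance (cadena : String) (out : List String) : Decidable (Spec_separate_point cadena out) := by unfold Spec_separate_point; infer_instance

-- ===== CLAIM (what is proved, stated in full; the proofs are below) =====
def Claim_equal_separate_point : Prop := ∀ (cadena : String), Dom_separate_point cadena → Spec_separate_point cadena (separate_point cadena)

-- ===== LEMMAS AND PROOFS =====

-- the combined character substitution '.'→'_', ' '→'_'
def pvG : Char → Char := fun c => if c = '.' then '_' else if c = ' ' then '_' else c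

-- prepend onto the first segment
def pvConsHead (p : List Char) : List (List Char) → List (List Char)
  | [] => [p]
  | h :: t => (p ++ h) :: t

-- split at commas, keeping empty segments (what str.split(',') computes)
def pvSplit1 : List Char → List (List Char)
  | [] => [[]]
  | c :: t => if c = ',' then [] :: pvSplit1 t else pvConsHead [c] (pvSplit1 t)

-- drop a trailing empty segment
def pvDropTrail : List (List Char) → List (List Char)
  | [] => []
  | [x] => if x = [] then [] else [x]
  | x :: y :: t => x :: pvDropTrail (y :: t)

lemma replace_single_go (o n : Char) :
    ∀ (l : List Char) (fuel : Nat) (acc : List Char), l.length ≤ fuel →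
    PySem.Chars.replace.go [o] [n] fuel l acc
      = acc.reverse ++ l.map (fun c => if c = o then n else c) := by
  intro l
  induction l with
  | nil => intro fuel acc _; cases fuel <;> simp [PySem.Chars.replace.go]
  | cons c t ih =>
    intro fuel acc h
    cases fuel with
    | zero => simp at h
    | succ f =>
      simp only [PySem.Chars.replace.go, List.isPrefixOf]
      by_cases hc : c = o
      · simp [hc, ih f _ (by simpa using h)]
      · simp [hc, Ne.symm hc, ih f _ (by simpa using h), beq_iff_eq]

lemma replace_single (cs : List Char) (o n : Char) :
    PySem.Chars.replace cs [o] [n] = cs.map (fun c => if c = o then n else c) := by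
  simp [PySem.Chars.replace, replace_single_go o n cs cs.length [] le_rfl]

lemma rep2 (cs : List Char) :
    PySem.Chars.replace (PySem.Chars.replace cs ['.'] ['_']) [' '] ['_'] = cs.map pvG := by
  simp only [replace_single, List.map_map]
  refine List.map_congr_left ?_
  intro c _
  simp only [Function.comp, pvG]
  by_cases h1 : c = '.' <;> by_cases h2 : c = ' ' <;> simp [h1, h2]

lemma map_pvG_idem (cs : List Char) : (cs.map pvG).map pvG = cs.map pvG := by
  simp only [List.map_map]
  refine List.map_congr_left ?_
  intro c _
  simp only [Function.comp, pvG]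
  by_cases h1 : c = '.' <;> by_cases h2 : c = ' ' <;> simp [h1, h2]

lemma no_space_of_fix {r : List Char} (hr : r.map pvG = r) : ' ' ∉ r := by
  intro hmem
  rw [← hr] at hmem
  rcases List.mem_map.1 hmem with ⟨c, _, hc⟩
  simp only [pvG] at hc
  by_cases h1 : c = '.' <;> by_cases h2 : c = ' ' <;> simp [h1, h2] at hc

lemma pvSplit1_ne_nil (l : List Char) : pvSplit1 l ≠ [] := by
  cases l with
  | nil => simp [pvSplit1]
  | cons c t =>
    simp only [pvSplit1]
    split
    · simp
    · cases h : pvSplit1 t <;> simp [pvConsHead]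

lemma pvConsHead_nil_left {L : List (List Char)} (h : L ≠ []) : pvConsHead [] L = L := by
  cases L with
  | nil => simp at h
  | cons a t => simp [pvConsHead]

lemma pvConsHead_consHead (p q : List Char) (L : List (List Char)) :
    pvConsHead p (pvConsHead q L) = pvConsHead (p ++ q) L := by
  cases L <;> simp [pvConsHead]

lemma splitOn_single_go :
    ∀ (l : List Char) (fuel : Nat) (cur : List Char) (acc : List (List Char)), l.length ≤ fuel →
    PySem.Chars.splitOn.go [','] fuel l cur acc
      = acc.reverse ++ pvConsHead cur.reverse (pvSplit1 l) := by
  intro l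
  induction l with
  | nil =>
    intro fuel cur acc _
    cases fuel <;> simp [PySem.Chars.splitOn.go, pvSplit1, pvConsHead]
  | cons c t ih =>
    intro fuel cur acc h
    cases fuel with
    | zero => simp at h
    | succ f =>
      simp only [PySem.Chars.splitOn.go, List.isPrefixOf]
      by_cases hc : c = ','
      · simp only [hc, beq_self_eq_true, Bool.true_and, if_pos,
          List.length_cons, List.length_nil, List.drop_succ_cons, List.drop_zero]
        rw [ih f _ _ (by simpa using h)]
        cases hs : pvSplit1 t with
        | nil => exact absurd hs (pvSplit1_ne_nil t)
        | cons a s => simp [pvSplit1, pvConsHead, hs]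
      · have hb : ((',' : Char) == c) = false := by simp [Ne.symm hc]
        simp only [hb, Bool.false_and, Bool.false_eq_true, if_false]
        rw [ih f _ _ (by simpa using h)]
        simp [pvSplit1, hc, pvConsHead_consHead]

lemma splitOn_single (cs : List Char) :
    PySem.Chars.splitOn cs [','] = pvSplit1 cs := by
  rw [PySem.Chars.splitOn, splitOn_single_go cs (cs.length+1) [] [] (by omega)]
  simp [pvConsHead_nil_left (pvSplit1_ne_nil cs)]
lemma sepAux_absorb (fuel : Nat) (cs : List Char) (x sep : Int) (l : List String) :
    sepAux fuel cs x sep l = sepAux fuel (cs.map pvG) x sep l := by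
  cases fuel with
  | zero => rfl
  | succ f => simp only [sepAux, rep2, map_pvG_idem, List.length_map]

lemma sepAux_fixed (r : List Char) (hr : r.map pvG = r) :
    ∀ (fuel x sep : Nat) (lista : List String), sep ≤ x → x + fuel = r.length → x < r.length →
    sepAux fuel r (x : Int) (sep : Int) lista
      = lista ++ (pvDropTrail (pvConsHead ((r.drop sep).take (x - sep))
          (pvSplit1 (r.drop x)))).map String.ofList := by
  intro fuel
  induction fuel with
  | zero => intro x sep lista _ h2 h3; omega
  | succ f ih =>
    intro x sep lista hsx hxf hxn
    have hdx : r.drop x = r[x] :: r.drop (x+1) := List.drop_eq_getElem_cons hxn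
    have hg : PySem.List.pyGet? r (x:Int) = some r[x] := by
      rw [PySem.List.pyGet?_natCast]; exact List.getElem?_eq_getElem hxn
    have hcast1 : ((sep:Int) + 1) = ((sep+1 : Nat) : Int) := by push_cast; ring
    have hcastx : ((x:Int) + 1) = ((x+1 : Nat) : Int) := by push_cast; ring
    have hsl1 : PySem.List.slice r (some (sep:Int)) (some ((sep:Int)+1)) = (r.drop sep).take 1 := by
      rw [hcast1, PySem.List.slice_natCast]
      congr 1; omega
    have hnosp : (r.drop sep).take 1 ≠ [' '] := by
      intro hEq
      have hm : ' ' ∈ r := by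
        have : ' ' ∈ (r.drop sep).take 1 := by rw [hEq]; simp
        exact List.mem_of_mem_drop (List.mem_of_mem_take this)
      exact no_space_of_fix hr hm
    have hseg : ∀ a b : Nat, PySem.List.slice r (some (a:Int)) (some (b:Int)) = (r.drop a).take (b - a) :=
      fun a b => PySem.List.slice_natCast r a b
    have htdt : (r.drop sep).take (x - sep) ++ [r[x]] = (r.drop sep).take (x + 1 - sep) := by
      rw [show x + 1 - sep = (x - sep) + 1 by omega, List.take_add_one]
      congr 1
      have h1 : (r.drop sep)[x - sep]? = r[x]? := by
        rw [List.getElem?_drop]; congr 1; omega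
      rw [h1, List.getElem?_eq_getElem hxn]
      rfl
    simp only [sepAux, rep2, hr]
    rw [if_pos (show (x:Int) < (r.length:Int) by exact_mod_cast hxn), hg, hsl1]
    by_cases hlast : x + 1 = r.length
    · -- last iteration; f = 0
      have hf : f = 0 := by omega
      subst hf
      have hdx1 : r.drop (x+1) = [] := by
        apply List.drop_eq_nil_of_le; omega
      have hlastInt : (x:Int) = (r.length:Int) - 1 := by
        have : (x:Int) + 1 = (r.length:Int) := by exact_mod_cast hlast
        omega
      by_cases hc : r[x] = ','
      · -- comma at the last position: empty final slice, nothing appended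
        rw [if_pos (by rw [hc]), if_pos hnosp, if_pos hlastInt]
        have hsl0 : PySem.List.slice r (some ((x:Int)+1)) (some ((x:Int)+1)) = ([] : List Char) := by
          rw [hcastx, hseg]; simp
        rw [if_neg (by simp [hsl0])]
        rw [hseg sep x]
        simp only [sepAux]
        rw [hdx, hdx1]
        simp [pvSplit1, pvConsHead, pvDropTrail, hc]
      · rw [if_neg (by simpa using hc), if_pos hlastInt]
        have hslx : PySem.List.slice r (some (sep:Int)) (some ((x:Int)+1)) = (r.drop sep).take (x+1-sep) := by
          rw [hcastx, hseg]
        have hne : (r.drop sep).take (x+1-sep) ≠ [] := by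
          intro h
          have := congrArg List.length h
          simp [List.length_take, List.length_drop] at this
          omega
        rw [hslx, if_pos hne]
        simp only [sepAux]
        rw [hdx, hdx1]
        simp only [pvSplit1, hc, if_false, pvConsHead, pvDropTrail]
        rw [← htdt]
        simp
    · -- not the last iteration
      have hlastInt : ¬ ((x:Int) = (r.length:Int) - 1) := by
        intro h
        have : (x:Int) + 1 = (r.length:Int) := by omega
        have : x + 1 = r.length := by exact_mod_cast this
        omega
      by_cases hc : r[x] = ','
      · rw [if_pos (by rw [hc]), if_pos hnosp, if_neg hlastInt]
        rw [hseg sep x, hcastx]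
        rw [ih (x+1) (x+1) _ le_rfl (by omega) (by omega)]
        have hS := pvSplit1_ne_nil (r.drop (x+1))
        rw [hdx]
        simp only [Nat.sub_self, List.take_zero, pvConsHead_nil_left hS]
        simp only [pvSplit1, hc, if_true]
        cases hS' : pvSplit1 (r.drop (x+1)) with
        | nil => exact absurd hS' hS
        | cons a S =>
          simp [pvConsHead, pvDropTrail]
      · rw [if_neg (by simpa using hc), if_neg hlastInt, hcastx]
        rw [ih (x+1) sep lista (by omega) (by omega) (by omega)]
        rw [hdx]
        simp only [pvSplit1, hc, if_false]
        rw [pvConsHead_consHead, htdt]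

lemma A_eq (cadena : String) :
    separate_point cadena
      = (pvDropTrail (pvSplit1 (cadena.toList.map pvG))).map String.ofList := by
  unfold separate_point
  rcases Nat.eq_zero_or_pos cadena.toList.length with h0 | hpos
  · rw [List.length_eq_zero_iff] at h0
    rw [h0]
    simp [sepAux, pvSplit1, pvDropTrail]
  · rw [sepAux_absorb]
    have hfix : (cadena.toList.map pvG).map pvG = cadena.toList.map pvG := map_pvG_idem _
    have hlen : (cadena.toList.map pvG).length = cadena.toList.length := by simp
    have := sepAux_fixed (cadena.toList.map pvG) hfix cadena.toList.length 0 0 []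
      (le_refl 0) (by omega) (by omega)
    rw [show ((0:Nat):Int) = (0:Int) by rfl] at this
    rw [this]
    rw [Nat.sub_self, List.take_zero, List.nil_append,
      pvConsHead_nil_left (pvSplit1_ne_nil _), List.drop_zero]

lemma B_fixup (L : List (List Char)) :
    (if (L.map String.ofList) ≠ [] ∧ (L.map String.ofList).getLast? = some "" then
        (L.map String.ofList).dropLast else L.map String.ofList)
      = (pvDropTrail L).map String.ofList := by
  induction L with
  | nil => simp [pvDropTrail]
  | cons a L ih =>
    cases L with
    | nil =>
      by_cases ha : a = []
      · subst ha; simp [pvDropTrail]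
      · simp [pvDropTrail, ha]
    | cons b t =>
      simp only [List.map_cons] at ih ⊢
      rw [pvDropTrail, List.map_cons, ← ih]
      by_cases hc : (String.ofList b :: t.map String.ofList).getLast? = some ""
      · rw [if_pos ⟨by simp, by simpa using hc⟩, if_pos ⟨by simp, hc⟩, List.dropLast_cons₂]
      · rw [if_neg (by simpa using hc), if_neg (by simpa using hc)]

lemma B_eq (cadena : String) :
    separate_point_alt cadena
      = (pvDropTrail (pvSplit1 (cadena.toList.map pvG))).map String.ofList := by
  unfold separate_point_alt
  have h1 : (PySem.Str.replace (PySem.Str.replace cadena "." "_") " " "_").toList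
      = cadena.toList.map pvG := by
    simp only [PySem.Str.replace, String.toList_ofList]
    exact rep2 _
  rw [h1, splitOn_single, B_fixup]

-- ===== VERDICT (by name: the statement is the Claim_ definition above) =====
theorem separate_point_spec : Claim_equal_separate_point := by
  intro cadena _
  unfold Spec_separate_point
  rw [A_eq, B_eq]
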